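-- pv_equiv track=rewrite | github.com/NaveenkumarMD/Leet-code | CEt/20-10-21/two.py | solve
-- ===== SOURCE A (Python) =====
-- def solve(arr):
--     c=0
--     for i in range(len(arr)):
--         if arr[i]!=c:
--             temp=0
--             for j in range(i+1,len(arr)):
--                 if arr[j]==c:
--                     temp=j
--                     break
--             if temp!=0:
--                 arr[temp],arr[i]=arr[i],arr[temp]
--             else:
--                 c+=1
--     return arr
-- ===== SOURCE B (Python) =====
-- def solve(arr):
--     n = len(arr)
--     pos = {}
--     for idx, v in enumerate(arr):
--         pos.setdefault(v, []).append(idx)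
--     c = 0
--     cur = iter(sorted(pos.get(c, [])))
--     for i in range(n):
--         if arr[i] != c:
--             temp = 0
--             for idx in cur:
--                 if idx > i and arr[idx] == c:
--                     temp = idx
--                     break
--             if temp:
--                 v = arr[i]
--                 arr[i] = c
--                 arr[temp] = v
--                 pos.setdefault(v, []).append(temp)
--             else:
--                 c += 1
--                 cur = iter(sorted(pos.get(c, [])))
--     return arr
-- ===== Notes on version B (the rewrite author's own statement) =====
-- stated objective: faster
-- what changed: Replaces the O(n) inner forward scan for the next occurrence of c with a value-to-sorted-index-list map built once and consumed lazily (stale/passed entries skipped, swap targets re-registered), so each search is amortized O(1) after an O(k log k) sort per activated value.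
import Mathlib
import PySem

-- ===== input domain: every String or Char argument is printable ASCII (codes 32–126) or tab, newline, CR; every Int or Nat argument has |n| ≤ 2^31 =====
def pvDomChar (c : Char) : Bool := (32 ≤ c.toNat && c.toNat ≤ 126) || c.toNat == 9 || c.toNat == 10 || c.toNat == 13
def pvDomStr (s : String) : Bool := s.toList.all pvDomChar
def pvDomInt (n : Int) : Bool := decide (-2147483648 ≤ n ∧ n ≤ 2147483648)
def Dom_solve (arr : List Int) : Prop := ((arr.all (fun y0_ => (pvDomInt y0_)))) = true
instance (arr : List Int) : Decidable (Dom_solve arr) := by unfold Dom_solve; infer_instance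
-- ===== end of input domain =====

-- B replaces A's O(n) inner forward scan by a value → sorted-position-list index consumed
-- lazily (objective: faster, O(n log n) vs O(n^2)); equivalence of the RETURN value is proved
-- (the Python A mutates its argument in place and so does the Python B).

-- ===== PORT A =====
-- inner loop: 'temp=0; for j in range(i+1, len(arr)): if arr[j]==c: temp=j; break'
def findTempA (arr : List Int) (c : Int) (j : Nat) : Nat :=
  if _h : j < arr.length then
    if arr.getD j 0 = c then j else findTempA arr c (j + 1)
  else 0
termination_by arr.length - j

-- outer loop 'for i in range(len(arr))' with state (arr, c)
def goA (n : Nat) (arr : List Int) (c : Int) (i : Nat) : List Int :=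
  if _h : i < n then
    if arr.getD i 0 ≠ c then
      if findTempA arr c (i + 1) ≠ 0 then
        goA n ((arr.set (findTempA arr c (i + 1)) (arr.getD i 0)).set i
          (arr.getD (findTempA arr c (i + 1)) 0)) c (i + 1)
      else
        goA n arr (c + 1) (i + 1)
    else goA n arr c (i + 1)
  else arr
termination_by n - i

def solve (arr : List Int) : List Int := goA arr.length arr 0 0

-- ===== PORT B =====
-- 'for idx, v in enumerate(arr): pos.setdefault(v, []).append(idx)'
def buildPosB : List Int → Nat → PySem.Dict Int (List Nat) → PySem.Dict Int (List Nat)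
  | [], _, d => d
  | v :: rest, idx, d => buildPosB rest (idx + 1) (d.insert v (d.getD v [] ++ [idx]))

-- 'for idx in cur: if idx > i and arr[idx] == c: temp = idx; break'  (cur is the iterator;
-- the returned list is the iterator's remaining suffix)
def popLoopB (arr : List Int) (c : Int) (i : Nat) : List Nat → Nat × List Nat
  | [] => (0, [])
  | idx :: rest =>
      if i < idx ∧ arr.getD idx 0 = c then (idx, rest) else popLoopB arr c i rest

-- outer loop with state (arr, c, cur, pos)
def goB (n : Nat) (arr : List Int) (c : Int) (cur : List Nat)
    (pos : PySem.Dict Int (List Nat)) (i : Nat) : List Int :=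
  if _h : i < n then
    if arr.getD i 0 ≠ c then
      if (popLoopB arr c i cur).1 ≠ 0 then
        goB n ((arr.set i c).set (popLoopB arr c i cur).1 (arr.getD i 0)) c
          (popLoopB arr c i cur).2
          (pos.insert (arr.getD i 0) (pos.getD (arr.getD i 0) [] ++ [(popLoopB arr c i cur).1]))
          (i + 1)
      else
        goB n arr (c + 1) (PySem.List.sorted (pos.getD (c + 1) []) (fun x => x) false) pos (i + 1)
    else goB n arr c cur pos (i + 1)
  else arr
termination_by n - i

def solve_alt (arr : List Int) : List Int :=
  let pos := buildPosB arr 0 PySem.Dict.empty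
  goB arr.length arr 0 (PySem.List.sorted (pos.getD 0 []) (fun x => x) false) pos 0

-- ===== PRECONDITION & SPEC =====
def Spec_solve (arr : List Int) (out : List Int) : Prop := out = solve_alt arr
instance (arr : List Int) (out : List Int) : Decidable (Spec_solve arr out) := by unfold Spec_solve; infer_instance

-- ===== CLAIM (what is proved, stated in full; the proofs are below) =====
def Claim_equal_solve : Prop := ∀ (arr : List Int), Dom_solve arr → Spec_solve arr (solve arr)

-- ===== LEMMAS AND PROOFS =====

lemma getD_set_ne {α : Type} (l : List α) (k j : Nat) (a d : α) (h : j ≠ k) :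
    (l.set k a).getD j d = l.getD j d := by
  simp [List.getD_eq_getElem?_getD, List.getElem?_set_ne (Ne.symm h)]

lemma getD_set_self {α : Type} (l : List α) (k : Nat) (a d : α) (h : k < l.length) :
    (l.set k a).getD k d = a := by
  simp [List.getD_eq_getElem?_getD, h]

-- findTempA returns 0 when no j in [k, n) holds c
lemma findTempA_none (arr : List Int) (c : Int) (k : Nat)
    (h : ∀ j, k ≤ j → j < arr.length → arr.getD j 0 ≠ c) : findTempA arr c k = 0 := by
  unfold findTempA
  split
  · rename_i hk
    rw [if_neg (h k le_rfl hk)]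
    exact findTempA_none arr c (k + 1) (fun j hj => h j (by omega))
  · rfl
termination_by arr.length - k

-- findTempA returns the first match
lemma findTempA_first (arr : List Int) (c : Int) (k j0 : Nat)
    (hk : k ≤ j0) (hj : j0 < arr.length) (hc : arr.getD j0 0 = c)
    (hmin : ∀ j, k ≤ j → j < j0 → arr.getD j 0 ≠ c) : findTempA arr c k = j0 := by
  unfold findTempA
  rw [dif_pos (lt_of_le_of_lt hk hj)]
  by_cases hkj : k = j0
  · subst hkj; rw [if_pos hc]
  · rw [if_neg (hmin k le_rfl (by omega))]
    exact findTempA_first arr c (k + 1) j0 (by omega) hj hc (fun j hj1 => hmin j (by omega))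
termination_by arr.length - k

-- the remaining iterator is a suffix of cur
lemma popLoopB_suffix (arr : List Int) (c : Int) (i : Nat) (cur : List Nat) :
    (popLoopB arr c i cur).2 <:+ cur := by
  induction cur with
  | nil => simp [popLoopB]
  | cons idx rest ih =>
      unfold popLoopB
      split
      · exact List.suffix_cons idx rest
      · exact ih.trans (List.suffix_cons idx rest)

-- when no live position of c lies beyond i, the pop loop finds nothing
lemma popLoopB_none (arr : List Int) (c : Int) (i : Nat) (cur : List Nat)
    (hb : ∀ x ∈ cur, x < arr.length)
    (h : ∀ j, i < j → j < arr.length → arr.getD j 0 ≠ c) :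
    (popLoopB arr c i cur).1 = 0 := by
  induction cur with
  | nil => rfl
  | cons idx rest ih =>
      unfold popLoopB
      rw [if_neg]
      · exact ih (fun x hx => hb x (List.mem_cons_of_mem _ hx))
      · rintro ⟨h1, h2⟩
        exact h idx h1 (hb idx (List.mem_cons_self ..)) h2

-- under the invariant the pop loop finds exactly the first live position of c beyond i,
-- and every other live position stays in the remaining iterator
lemma popLoopB_found (arr : List Int) (c : Int) (i : Nat) (cur : List Nat) (j0 : Nat)
    (hs : cur.Pairwise (· ≤ ·)) (hb : ∀ x ∈ cur, x < arr.length)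
    (hC : ∀ j, i < j → j < arr.length → arr.getD j 0 = c → j ∈ cur)
    (hij : i < j0) (hj : j0 < arr.length) (hc : arr.getD j0 0 = c)
    (hmin : ∀ j, i < j → j < j0 → arr.getD j 0 ≠ c) :
    (popLoopB arr c i cur).1 = j0 ∧
      ∀ j, i < j → j < arr.length → arr.getD j 0 = c → j ≠ j0 →
        j ∈ (popLoopB arr c i cur).2 := by
  induction cur with
  | nil => exact absurd (hC j0 hij hj hc) (List.not_mem_nil)
  | cons idx rest ih =>
      unfold popLoopB
      by_cases hval : i < idx ∧ arr.getD idx 0 = c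
      · rw [if_pos hval]
        have hidx : idx = j0 := by
          have h1 : j0 ≤ idx := by
            by_contra hlt
            exact hmin idx hval.1 (by omega) hval.2
          have h2 : idx ≤ j0 := by
            have := hC j0 hij hj hc
            rcases List.mem_cons.mp this with h | h
            · omega
            · exact List.rel_of_pairwise_cons hs h
          omega
        subst hidx
        refine ⟨rfl, ?_⟩
        intro j hj1 hj2 hj3 hj4
        have := hC j hj1 hj2 hj3
        rcases List.mem_cons.mp this with h | h
        · exact absurd h hj4
        · exact h
      · rw [if_neg hval]
        refine ih hs.of_cons (fun x hx => hb x (List.mem_cons_of_mem _ hx)) ?_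
        intro j hj1 hj2 hj3
        have := hC j hj1 hj2 hj3
        rcases List.mem_cons.mp this with h | h
        · subst h; exact absurd ⟨hj1, hj3⟩ hval
        · exact h

-- membership in a dict list only grows along buildPosB
lemma buildPosB_mono (arr : List Int) (idx : Nat) (d : PySem.Dict Int (List Nat))
    (v : Int) (x : Nat) (hx : x ∈ d.getD v []) : x ∈ (buildPosB arr idx d).getD v [] := by
  induction arr generalizing idx d with
  | nil => exact hx
  | cons w rest ih =>
      refine ih (idx + 1) _ ?_
      rw [PySem.Dict.getD_insert]
      split
      · rename_i hv; subst hv; exact List.mem_append_left _ hx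
      · exact hx

-- every position of arr is registered under its value
lemma buildPosB_mem (arr : List Int) : ∀ (idx : Nat) (d : PySem.Dict Int (List Nat))
    (j : Nat), j < arr.length → (idx + j) ∈ (buildPosB arr idx d).getD (arr.getD j 0) [] := by
  induction arr with
  | nil => intro idx d j hj; simp at hj
  | cons w rest ih =>
      intro idx d j hj
      match j with
      | 0 =>
          simp only [List.getD_eq_getElem?_getD, List.getElem?_cons_zero, Option.getD_some,
            Nat.add_zero]
          refine buildPosB_mono rest (idx + 1) _ w idx ?_
          rw [PySem.Dict.getD_insert, if_pos rfl]
          exact List.mem_append_right _ (List.mem_singleton.mpr rfl)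
      | j' + 1 =>
          have := ih (idx + 1) (d.insert w (d.getD w [] ++ [idx])) j' (by simpa using hj)
          simpa [List.getD_eq_getElem?_getD, Nat.add_assoc, Nat.add_comm 1 j'] using this

-- every registered position comes from d or from the scanned range
lemma buildPosB_bound (arr : List Int) : ∀ (idx : Nat) (d : PySem.Dict Int (List Nat))
    (v : Int) (x : Nat), x ∈ (buildPosB arr idx d).getD v [] →
      x ∈ d.getD v [] ∨ (idx ≤ x ∧ x < idx + arr.length) := by
  induction arr with
  | nil => intro idx d v x hx; exact Or.inl hx
  | cons w rest ih =>
      intro idx d v x hx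
      rcases ih (idx + 1) _ v x hx with h | h
      · rw [PySem.Dict.getD_insert] at h
        by_cases hv : v = w
        · rw [if_pos hv] at h
          rcases List.mem_append.mp h with h2 | h2
          · subst hv; exact Or.inl h2
          · right; simp at h2; subst h2; simp
        · rw [if_neg hv] at h; exact Or.inl h
      · right; simp only [List.length_cons]; omega

-- main simulation: with the invariant, A's loop and B's loop compute the same array
lemma go_eq (n : Nat) (fuel : Nat) : ∀ (i : Nat) (arr : List Int) (c : Int)
    (cur : List Nat) (pos : PySem.Dict Int (List Nat)),
    n - i ≤ fuel → arr.length = n →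
    cur.Pairwise (· ≤ ·) → (∀ x ∈ cur, x < n) →
    (∀ j, i < j → j < n → arr.getD j 0 = c → j ∈ cur) →
    (∀ j, i < j → j < n → j ∈ pos.getD (arr.getD j 0) []) →
    (∀ v x, x ∈ pos.getD v [] → x < n) →
    goA n arr c i = goB n arr c cur pos i := by
  intro i arr c cur pos
  induction fuel generalizing i arr c cur pos with
  | zero =>
      intro hfuel hlen hs hb hC hP hPB
      have hin : ¬ i < n := by omega
      rw [goA, goB, dif_neg hin, dif_neg hin]
  | succ fuel ih =>
      intro hfuel hlen hs hb hC hP hPB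
      by_cases hin : i < n
      · rw [goA, goB, dif_pos hin, dif_pos hin]
        by_cases hne : arr.getD i 0 ≠ c
        · rw [if_pos hne, if_pos hne]
          by_cases hex : ∃ j, i < j ∧ j < n ∧ arr.getD j 0 = c
          · -- a live position of c beyond i exists: both sides find the first one and swap
            set j0 := Nat.find hex with hj0def
            obtain ⟨hij, hjn, hcc⟩ := Nat.find_spec hex
            have hmin : ∀ j, i < j → j < j0 → arr.getD j 0 ≠ c := by
              intro j h1 h2 hc
              exact Nat.find_min hex h2 ⟨h1, by omega, hc⟩
            have hfT : findTempA arr c (i + 1) = j0 :=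
              findTempA_first arr c (i + 1) j0 (by omega) (by omega)
                hcc (fun j h1 h2 => hmin j (by omega) h2)
            have hpop := popLoopB_found arr c i cur j0 hs
              (fun x hx => by rw [hlen]; exact hb x hx)
              (fun j h1 h2 h3 => hC j h1 (by omega) h3) hij (by omega) hcc hmin
            rw [hfT, hpop.1, if_pos (show j0 ≠ 0 by omega), if_pos (show j0 ≠ 0 by omega)]
            have harr : (arr.set j0 (arr.getD i 0)).set i (arr.getD j0 0) =
                (arr.set i c).set j0 (arr.getD i 0) := by
              rw [hcc]
              exact List.set_comm _ _ (by omega : j0 ≠ i)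
            rw [harr]
            have hsuff := popLoopB_suffix arr c i cur
            refine ih _ _ _ _ _ (by omega) (by simp [hlen]) (hs.sublist hsuff.sublist)
              (fun x hx => hb x (hsuff.subset hx)) ?_ ?_ ?_
            · -- live positions of c survive in the remaining iterator
              intro j h1 h2 h3
              have hji : j ≠ i := by omega
              have hjj0 : j ≠ j0 := by
                intro hh; subst hh
                rw [getD_set_self _ _ _ _ (by simp [hlen]; omega)] at h3
                exact hne h3
              rw [getD_set_ne _ _ _ _ _ hjj0, getD_set_ne _ _ _ _ _ hji] at h3
              exact hpop.2 j (by omega) (by omega) h3 hjj0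
            · -- every unpassed position stays registered
              intro j h1 h2
              by_cases hjj0 : j = j0
              · subst hjj0
                rw [getD_set_self _ _ _ _ (by simp [hlen]; omega),
                  PySem.Dict.getD_insert, if_pos rfl]
                exact List.mem_append_right _ (List.mem_singleton.mpr rfl)
              · have hji : j ≠ i := by omega
                rw [getD_set_ne _ _ _ _ _ hjj0, getD_set_ne _ _ _ _ _ hji,
                  PySem.Dict.getD_insert]
                split
                · rename_i hv
                  exact List.mem_append_left _ (hv ▸ hP j (by omega) h2)
                · exact hP j (by omega) h2
            · -- registered positions stay in range
              intro v x hx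
              rw [PySem.Dict.getD_insert] at hx
              split at hx
              · rcases List.mem_append.mp hx with h | h
                · exact hPB _ x h
                · simp at h; omega
              · exact hPB _ x hx
          · -- no live position of c beyond i: both sides bump c
            push Not at hex
            have hnone : ∀ j, i < j → j < arr.length → arr.getD j 0 ≠ c := by
              intro j h1 h2; exact hex j h1 (by omega)
            have hfT : findTempA arr c (i + 1) = 0 :=
              findTempA_none arr c (i + 1) (fun j h1 h2 => hnone j (by omega) h2)
            have hpop : (popLoopB arr c i cur).1 = 0 :=
              popLoopB_none arr c i cur (fun x hx => by rw [hlen]; exact hb x hx) hnone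
            rw [hfT, hpop]
            simp only [ne_eq, not_true_eq_false, if_false]
            refine ih _ _ _ _ _ (by omega) hlen ?_ ?_ ?_ ?_ hPB
            · have := PySem.List.sorted_pairwise (pos.getD (c + 1) []) (fun x => x) 
              simpa using this
            · intro x hx
              exact hPB _ x ((PySem.List.mem_sorted _ _ _ _).mp hx)
            · intro j h1 h2 h3
              refine (PySem.List.mem_sorted _ _ _ _).mpr ?_
              have := hP j (by omega) h2
              rwa [h3] at this
            · intro j h1 h2
              exact hP j (by omega) h2
        · rw [if_neg hne, if_neg hne]
          refine ih _ _ _ _ _ (by omega) hlen hs hb ?_ ?_ hPB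
          · intro j h1 h2 h3; exact hC j (by omega) h2 h3
          · intro j h1 h2; exact hP j (by omega) h2
      · rw [goA, goB, dif_neg hin, dif_neg hin]

-- ===== VERDICT (by name: the statement is the Claim_ definition above) =====
theorem solve_spec : Claim_equal_solve := by
  intro arr _
  unfold Spec_solve solve solve_alt
  show goA arr.length arr 0 0 = goB arr.length arr 0
    (PySem.List.sorted ((buildPosB arr 0 PySem.Dict.empty).getD 0 []) (fun x => x) false)
    (buildPosB arr 0 PySem.Dict.empty) 0
  refine go_eq arr.length arr.length 0 arr 0 _ _ (by omega) rfl ?_ ?_ ?_ ?_ ?_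
  · simpa using PySem.List.sorted_pairwise ((buildPosB arr 0 PySem.Dict.empty).getD 0 []) (fun x => x)
  · intro x hx
    have hm := (PySem.List.mem_sorted _ _ _ _).mp hx
    rcases buildPosB_bound arr 0 PySem.Dict.empty 0 x hm with h | h
    · simp [PySem.Dict.getD] at h
    · omega
  · intro j h1 h2 h3
    refine (PySem.List.mem_sorted _ _ _ _).mpr ?_
    have := buildPosB_mem arr 0 PySem.Dict.empty j h2
    rw [h3] at this
    simpa using this
  · intro j h1 h2
    have := buildPosB_mem arr 0 PySem.Dict.empty j h2
    simpa using this
  · intro v x hx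
    rcases buildPosB_bound arr 0 PySem.Dict.empty v x hx with h | h
    · simp [PySem.Dict.getD] at h
    · omega
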